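-- pv_equiv track=rewrite | github.com/HongyuHe/NetNomos | scripts/convert_golden_rules.py | remap_field_name
-- ===== SOURCE A (Python) =====
-- PCAP_FIELD_NAMES = {
--     "FrameLen": "frame.len",
--     "IpVersion": "ip.version",
--     "IpHdrLen": "ip.hdr_len",
--     "IpLen": "ip.len",
--     "IpTtl": "ip.ttl",
--     "IpProto": "ip.proto",
--     "IpSrc": "ip.src",
--     "IpDst": "ip.dst",
--     "TcpSrcport": "tcp.srcport",
--     "TcpDstport": "tcp.dstport",
--     "TcpHdrLen": "tcp.hdr_len",
--     "TcpLen": "tcp.len",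
--     "TcpFlags": "tcp.flags",
--     "TcpSeq": "tcp.seq",
--     "TcpAck": "tcp.ack",
--     "TcpUrgentPointer": "tcp.urgent_pointer",
--     "TcpWindowSizeValue": "tcp.window_size_value",
--     "TcpWindowSizeScalefactor": "tcp.window_size_scalefactor",
--     "TcpWindowSize": "tcp.window_size",
--     "Tsval": "tcp.options.timestamp.tsval",
--     "Tsecr": "tcp.options.timestamp.tsecr",
--     "Protocol": "_ws.col.protocol",
--     "InterArrivalMicro": "interarrival_micro",
-- }
--
-- def remap_field_name(field_name: str, field_mode: str) -> str:
--     if field_mode != "pcap":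
--         return field_name
--     if "_" in field_name:
--         base, _, suffix = field_name.rpartition("_")
--         if suffix.isdigit() and base in PCAP_FIELD_NAMES:
--             return f"{PCAP_FIELD_NAMES[base]}_ctx{int(suffix) - 1}"
--         return field_name
--     index_start = len(field_name)
--     while index_start > 0 and field_name[index_start - 1].isdigit():
--         index_start -= 1
--     if index_start == len(field_name):
--         return PCAP_FIELD_NAMES.get(field_name, field_name)
--     base = field_name[:index_start]
--     suffix = field_name[index_start:]
--     if base not in PCAP_FIELD_NAMES or not suffix.isdigit():
--         return field_name
--     return f"{PCAP_FIELD_NAMES[base]}_ctx{int(suffix) - 1}"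
-- ===== SOURCE B (Python) =====
-- PCAP_FIELD_NAMES = {
--     "FrameLen": "frame.len",
--     "IpVersion": "ip.version",
--     "IpHdrLen": "ip.hdr_len",
--     "IpLen": "ip.len",
--     "IpTtl": "ip.ttl",
--     "IpProto": "ip.proto",
--     "IpSrc": "ip.src",
--     "IpDst": "ip.dst",
--     "TcpSrcport": "tcp.srcport",
--     "TcpDstport": "tcp.dstport",
--     "TcpHdrLen": "tcp.hdr_len",
--     "TcpLen": "tcp.len",
--     "TcpFlags": "tcp.flags",
--     "TcpSeq": "tcp.seq",
--     "TcpAck": "tcp.ack",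
--     "TcpUrgentPointer": "tcp.urgent_pointer",
--     "TcpWindowSizeValue": "tcp.window_size_value",
--     "TcpWindowSizeScalefactor": "tcp.window_size_scalefactor",
--     "TcpWindowSize": "tcp.window_size",
--     "Tsval": "tcp.options.timestamp.tsval",
--     "Tsecr": "tcp.options.timestamp.tsecr",
--     "Protocol": "_ws.col.protocol",
--     "InterArrivalMicro": "interarrival_micro",
-- }
--
-- def remap_field_name(field_name: str, field_mode: str) -> str:
--     # Table-driven: instead of parsing the name (rpartition / trailing-digit
--     # loop), scan the known keys and match each against the name directly.
--     # A name remaps iff it is exactly a key, or a key followed by an optional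
--     # '_' and a run of digits (no key contains '_' or a digit, so at most one
--     # key can match and this coincides with the original's string surgery).
--     if field_mode != "pcap":
--         return field_name
--     for key, mapped in PCAP_FIELD_NAMES.items():
--         if field_name == key:
--             return mapped
--         if field_name.startswith(key):
--             rest = field_name[len(key):]
--             digits = rest[1:] if rest.startswith("_") else rest
--             if digits.isdigit():
--                 return f"{mapped}_ctx{int(digits) - 1}"
--     return field_name
-- ===== Notes on version B (the rewrite author's own statement) =====
-- stated objective: alternative
-- what changed: A parses the field name (rpartition at the last '_' in one branch, a manual trailing-digit while-loop in the other); B instead scans the PCAP_FIELD_NAMES table once and matches the name against each key directly as key, key+digits or key+'_'+digits (no key contains '_' or a digit, so at most one key matches and the behaviours coincide).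
import Mathlib
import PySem

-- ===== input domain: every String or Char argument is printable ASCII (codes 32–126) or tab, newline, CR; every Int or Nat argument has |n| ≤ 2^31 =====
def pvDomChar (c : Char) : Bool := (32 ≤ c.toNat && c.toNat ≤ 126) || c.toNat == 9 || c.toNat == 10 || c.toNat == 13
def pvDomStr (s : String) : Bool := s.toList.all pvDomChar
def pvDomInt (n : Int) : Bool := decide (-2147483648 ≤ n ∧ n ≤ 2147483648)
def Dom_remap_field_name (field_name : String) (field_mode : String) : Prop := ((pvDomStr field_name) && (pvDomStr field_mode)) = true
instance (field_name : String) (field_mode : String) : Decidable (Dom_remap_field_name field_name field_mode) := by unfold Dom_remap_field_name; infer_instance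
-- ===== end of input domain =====

-- B replaces A's string surgery (rpartition at the last '_' / a manual trailing-digit
-- while-loop) by a table scan: for each known key, match the name against
-- key / key+digits / key+'_'+digits directly (objective: alternative).

-- The module-level dict PCAP_FIELD_NAMES (shared context of both programs)
def pcapItems : List (String × String) :=
  [("FrameLen", "frame.len"), ("IpVersion", "ip.version"), ("IpHdrLen", "ip.hdr_len"),
   ("IpLen", "ip.len"), ("IpTtl", "ip.ttl"), ("IpProto", "ip.proto"), ("IpSrc", "ip.src"),
   ("IpDst", "ip.dst"), ("TcpSrcport", "tcp.srcport"), ("TcpDstport", "tcp.dstport"),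
   ("TcpHdrLen", "tcp.hdr_len"), ("TcpLen", "tcp.len"), ("TcpFlags", "tcp.flags"),
   ("TcpSeq", "tcp.seq"), ("TcpAck", "tcp.ack"), ("TcpUrgentPointer", "tcp.urgent_pointer"),
   ("TcpWindowSizeValue", "tcp.window_size_value"),
   ("TcpWindowSizeScalefactor", "tcp.window_size_scalefactor"),
   ("TcpWindowSize", "tcp.window_size"), ("Tsval", "tcp.options.timestamp.tsval"),
   ("Tsecr", "tcp.options.timestamp.tsecr"), ("Protocol", "_ws.col.protocol"),
   ("InterArrivalMicro", "interarrival_micro")]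

def pcapFieldNames : PySem.Dict String String := PySem.Dict.ofList pcapItems

-- f"{v}_ctx{int(suffix) - 1}"  (suffix is guarded to be all digits in both programs,
-- so int(suffix) never raises; the getD 0 default is unreachable)
def pvFmtCtx (v : String) (suffix : List Char) : String :=
  String.ofList (v.toList ++ ("_ctx".toList ++ (PySem.Int.toStr ((PySem.Int.ofChars? suffix).getD 0 - 1)).toList))

-- ===== PORT A =====
-- A's while-loop: while index_start > 0 and field_name[index_start-1].isdigit(): index_start -= 1
def pvIdxStart (s : List Char) : Nat → Nat
  | 0 => 0
  | n + 1 => if PySem.Chars.isdigit (s.getD n ' ') then pvIdxStart s n else n + 1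

def remap_field_name (field_name : String) (field_mode : String) : String :=
  if field_mode != "pcap" then field_name
  else if PySem.Str.isIn "_" field_name then
    -- str.rpartition("_") , exact under the guard '_' ∈ field_name: split at the LAST '_'
    let suffix := (field_name.toList.reverse.takeWhile (fun c => c != '_')).reverse
    let base := field_name.toList.take (field_name.toList.length - suffix.length - 1)
    if PySem.Chars.strIsdigit suffix && pcapFieldNames.contains (String.ofList base) then
      pvFmtCtx (pcapFieldNames.getD (String.ofList base) "") suffix
    else field_name
  else
    let l := field_name.toList
    let i := pvIdxStart l l.length
    if i = l.length then pcapFieldNames.getD field_name field_name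
    else
      let base := l.take i
      let suffix := l.drop i
      if !pcapFieldNames.contains (String.ofList base) || !PySem.Chars.strIsdigit suffix then
        field_name
      else pvFmtCtx (pcapFieldNames.getD (String.ofList base) "") suffix

-- ===== PORT B =====
-- digits = rest[1:] if rest.startswith("_") else rest   (rest = field_name[len(key):])
def pvDs (k l : List Char) : List Char :=
  let r := l.drop k.length
  if PySem.Chars.startswith r ['_'] then r.drop 1 else r

-- the 'for key, mapped in PCAP_FIELD_NAMES.items():' loop with its early returns
def pvScan (fn : List Char) : List (String × String) → Option String
  | [] => none
  | (key, mapped) :: rest =>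
      if fn = key.toList then some mapped
      else if PySem.Chars.startswith fn key.toList then
        if PySem.Chars.strIsdigit (pvDs key.toList fn) then some (pvFmtCtx mapped (pvDs key.toList fn))
        else pvScan fn rest
      else pvScan fn rest

def remap_field_name_alt (field_name : String) (field_mode : String) : String :=
  if field_mode != "pcap" then field_name
  else
    match pvScan field_name.toList pcapFieldNames.items with
    | some out => out
    | none => field_name

-- ===== PRECONDITION & SPEC =====
def Spec_remap_field_name (field_name : String) (field_mode : String) (out : String) : Prop := out = remap_field_name_alt field_name field_mode
instance (field_name : String) (field_mode : String) (out : String) : Decidable (Spec_remap_field_name field_name field_mode out) := by unfold Spec_remap_field_name; infer_instance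

-- ===== CLAIM (what is proved, stated in full; the proofs are below) =====
def Claim_equal_remap_field_name : Prop := ∀ (field_name : String) (field_mode : String), Dom_remap_field_name field_name field_mode → Spec_remap_field_name field_name field_mode (remap_field_name field_name field_mode)

-- ===== LEMMAS AND PROOFS =====

-- a name `l` matches key `k` (B's loop body returns at `k`) iff it decomposes so:
def pvDecomp (k l : List Char) : Prop :=
  l = k ∨ ∃ ds, PySem.Chars.strIsdigit ds = true ∧ (l = k ++ ds ∨ l = k ++ '_' :: ds)

-- the Bool guard of one iteration of B's loop
def pvHit (k l : List Char) : Bool :=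
  l == k || (PySem.Chars.startswith l k && PySem.Chars.strIsdigit (pvDs k l))

-- what B's loop body returns when pvHit holds
def pvOut (k v : String) (fn : List Char) : String :=
  if fn = k.toList then v else pvFmtCtx v (pvDs k.toList fn)

-- keys of the table: nonempty, no digit, no underscore
def pvOkKey (k : List Char) : Prop :=
  k ≠ [] ∧ ∀ c ∈ k, PySem.Chars.isdigit c = false ∧ c ≠ '_'

lemma strIsdigit_spec (ds : List Char) (h : PySem.Chars.strIsdigit ds = true) :
    ds ≠ [] ∧ ∀ c ∈ ds, PySem.Chars.isdigit c = true := by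
  simp [PySem.Chars.strIsdigit] at h
  exact ⟨by simpa [List.isEmpty_iff] using h.1, h.2⟩

lemma startswith_underscore_false (ds : List Char) (h : PySem.Chars.strIsdigit ds = true) :
    PySem.Chars.startswith ds ['_'] = false := by
  rw [Bool.eq_false_iff]
  intro htrue
  obtain ⟨t, ht⟩ := (PySem.Chars.startswith_iff _ _).mp htrue
  have hmem : ('_' : Char) ∈ ds := by rw [← ht]; simp
  have := (strIsdigit_spec ds h).2 '_' hmem
  exact absurd this (by decide)

lemma pvHit_iff (k l : List Char) : pvHit k l = true ↔ pvDecomp k l := by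
  constructor
  · intro h
    simp only [pvHit, Bool.or_eq_true, beq_iff_eq, Bool.and_eq_true] at h
    rcases h with h | ⟨hpre, hdig⟩
    · exact Or.inl h
    · obtain ⟨t, ht⟩ := (PySem.Chars.startswith_iff _ _).mp hpre
      have hr : l.drop k.length = t := by rw [← ht]; exact List.drop_left
      by_cases hst : PySem.Chars.startswith t ['_'] = true
      · obtain ⟨u, hu⟩ := (PySem.Chars.startswith_iff _ _).mp hst
        have htu : t = '_' :: u := by simpa using hu.symm
        have hst' : PySem.Chars.startswith ('_' :: u) ['_'] = true :=
          (PySem.Chars.startswith_iff _ _).mpr ⟨u, rfl⟩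
        have hds : pvDs k l = u := by simp [pvDs, hr, htu, hst']
        exact Or.inr ⟨u, by rwa [hds] at hdig, Or.inr (by rw [← ht, htu])⟩
      · have hds : pvDs k l = t := by
          simp only [pvDs, hr]
          rw [if_neg hst]
        exact Or.inr ⟨t, by rwa [hds] at hdig, Or.inl ht.symm⟩
  · intro h
    rcases h with h | ⟨ds, hdig, h | h⟩
    · simp [pvHit, h]
    · have hpre : PySem.Chars.startswith l k = true :=
        (PySem.Chars.startswith_iff _ _).mpr ⟨ds, h.symm⟩
      have hr : l.drop k.length = ds := by rw [h]; exact List.drop_left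
      have hds : pvDs k l = ds := by
        simp only [pvDs, hr]
        rw [if_neg (by simp [startswith_underscore_false ds hdig])]
      simp [pvHit, hpre, hds, hdig]
    · have hpre : PySem.Chars.startswith l k = true :=
        (PySem.Chars.startswith_iff _ _).mpr ⟨'_' :: ds, h.symm⟩
      have hr : l.drop k.length = '_' :: ds := by rw [h]; exact List.drop_left
      have hst : PySem.Chars.startswith ('_' :: ds) ['_'] = true :=
        (PySem.Chars.startswith_iff _ _).mpr ⟨ds, rfl⟩
      have hds : pvDs k l = ds := by simp [pvDs, hr, hst]
      simp [pvHit, hpre, hds, hdig]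

lemma pvDecomp_prefix (k l : List Char) (h : pvDecomp k l) : k <+: l := by
  rcases h with h | ⟨ds, _, h | h⟩
  · exact h ▸ List.prefix_refl k
  · exact ⟨ds, h.symm⟩
  · exact ⟨'_' :: ds, h.symm⟩

-- if k = k' ++ m and both k, k' match l (k an OK key), the extension m is empty
lemma pvDecomp_sub (k k' m l : List Char) (hk : pvOkKey k) (hkk : k = k' ++ m)
    (h1 : pvDecomp k l) (h2 : pvDecomp k' l) : m = [] := by
  obtain ⟨r, hr⟩ := pvDecomp_prefix k l h1
  cases m with
  | nil => rfl
  | cons c m' =>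
    exfalso
    have hc : c ∈ k := by rw [hkk]; simp
    have hcd : PySem.Chars.isdigit c = false ∧ c ≠ '_' := hk.2 c hc
    have hl : l = k' ++ (c :: m' ++ r) := by rw [← hr, hkk]; simp
    rcases h2 with h2 | ⟨ds', hdig', h2 | h2⟩
    · -- l = k': but k' ++ (c :: …) = k' means a nonempty tail equals []
      rw [h2] at hl
      have : (c :: m' ++ r : List Char) = [] := by
        have := congrArg (List.drop k'.length) hl
        simp only [List.drop_left] at this
        simpa using this
      simp at this
    · -- l = k' ++ ds' with ds' all digits: c is a digit
      rw [h2] at hl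
      have hds' : (ds' : List Char) = c :: (m' ++ r) := by
        have := congrArg (List.drop k'.length) hl
        simpa [List.drop_left] using this
      have : PySem.Chars.isdigit c = true :=
        (strIsdigit_spec ds' hdig').2 c (by rw [hds']; simp)
      simp [hcd.1] at this
    · -- l = k' ++ '_'::ds': c = '_'
      rw [h2] at hl
      have hds' : ('_' : Char) = c ∧ (ds' : List Char) = m' ++ r := by
        have := congrArg (List.drop k'.length) hl
        simpa [List.drop_left] using this
      exact hcd.2 hds'.1.symm

lemma pvDecomp_unique (k k' l : List Char) (hk : pvOkKey k) (hk' : pvOkKey k')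
    (h1 : pvDecomp k l) (h2 : pvDecomp k' l) : k = k' := by
  rcases List.prefix_or_prefix_of_prefix (pvDecomp_prefix k l h1) (pvDecomp_prefix k' l h2) with
    ⟨m, hm⟩ | ⟨m, hm⟩
  · have : m = [] := pvDecomp_sub k' k m l hk' hm.symm h2 h1
    rw [this] at hm; simpa using hm
  · have : m = [] := pvDecomp_sub k k' m l hk hm.symm h1 h2
    rw [this] at hm; simpa using hm.symm

-- one step of B's loop, when the guard fails / holds
lemma pvScan_cons_miss (fn : List Char) (k v : String) (L : List (String × String))
    (h : pvHit k.toList fn = false) : pvScan fn ((k, v) :: L) = pvScan fn L := by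
  simp only [pvHit, Bool.or_eq_false_iff, Bool.and_eq_false_iff, beq_eq_false_iff_ne] at h
  rcases h.2 with h2 | h2
  · simp [pvScan, h.1, h2]
  · by_cases h3 : PySem.Chars.startswith fn k.toList = true
    · simp [pvScan, h.1, h3, h2]
    · simp [pvScan, h.1, h3]

lemma pvScan_cons_hit (fn : List Char) (k v : String) (L : List (String × String))
    (h : pvHit k.toList fn = true) : pvScan fn ((k, v) :: L) = some (pvOut k v fn) := by
  by_cases he : fn = k.toList
  · simp [pvScan, pvOut, he]
  · simp only [pvHit, Bool.or_eq_true, beq_iff_eq, Bool.and_eq_true] at h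
    rcases h with h | ⟨hpre, hdig⟩
    · exact absurd h he
    · simp [pvScan, pvOut, he, hpre, hdig]

lemma pvScan_eq_none (fn : List Char) (L : List (String × String))
    (h : ∀ p ∈ L, pvHit p.1.toList fn = false) : pvScan fn L = none := by
  induction L with
  | nil => rfl
  | cons p t ih =>
    obtain ⟨k, v⟩ := p
    rw [pvScan_cons_miss fn k v t (h (k, v) (by simp))]
    exact ih (fun q hq => h q (by simp [hq]))

lemma pvScan_eq_some (fn : List Char) (L : List (String × String)) (k v : String)
    (hmem : (k, v) ∈ L) (hhit : pvHit k.toList fn = true)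
    (huniq : ∀ p ∈ L, pvHit p.1.toList fn = true → p = (k, v)) :
    pvScan fn L = some (pvOut k v fn) := by
  induction L with
  | nil => simp at hmem
  | cons p t ih =>
    obtain ⟨k', v'⟩ := p
    by_cases hp : pvHit k'.toList fn = true
    · have : ((k', v') : String × String) = (k, v) := huniq (k', v') (by simp) hp
      obtain ⟨rfl, rfl⟩ := Prod.mk.injEq .. ▸ this
      exact pvScan_cons_hit fn k' v' t hp
    · have hne : ((k, v) : String × String) ≠ (k', v') := by
        intro he
        obtain ⟨rfl, rfl⟩ := Prod.mk.injEq .. ▸ he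
        exact hp hhit
      rw [pvScan_cons_miss fn k' v' t (by simpa using hp)]
      have hmem' : (k, v) ∈ t := by
        rcases List.mem_cons.mp hmem with he | ht
        · exact absurd he hne
        · exact ht
      exact ih hmem' (fun q hq hqh => huniq q (by simp [hq]) hqh)

-- table facts
lemma pcap_items_eq : pcapFieldNames.items = pcapItems := by decide

lemma pcap_keys_nodup : pcapFieldNames.keys.Nodup := by decide

set_option maxRecDepth 4096 in
lemma pcap_keys_ok_bool : pcapItems.all
    (fun p => !p.1.toList.isEmpty && p.1.toList.all (fun c => !(PySem.Chars.isdigit c) && c != '_')) = true := by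
  decide

lemma pcap_keys_ok : ∀ p ∈ pcapItems, pvOkKey p.1.toList := by
  intro p hp
  have h := List.all_eq_true.mp pcap_keys_ok_bool p hp
  simp only [Bool.and_eq_true, List.all_eq_true, Bool.not_eq_eq_eq_not, Bool.not_true,
    bne_iff_ne, ne_eq, List.isEmpty_eq_false_iff] at h
  exact ⟨h.1, fun c hc => ⟨(h.2 c hc).1, (h.2 c hc).2⟩⟩

lemma pcap_contains_eq_isSome (s : String) :
    pcapFieldNames.contains s = (pcapFieldNames.get? s).isSome :=
  PySem.Dict.contains_eq_isSome_get? pcapFieldNames s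

-- distinct keys: the value at a key is unique
lemma nodup_val (L : List (String × String)) (h : (L.map Prod.fst).Nodup)
    (k : String) (v v' : String) (h1 : (k, v) ∈ L) (h2 : (k, v') ∈ L) : v = v' := by
  induction L with
  | nil => simp at h1
  | cons p t ih =>
    simp only [List.map_cons, List.nodup_cons] at h
    rcases List.mem_cons.mp h1 with he1 | ht1 <;> rcases List.mem_cons.mp h2 with he2 | ht2
    · rw [← he1] at he2; exact (Prod.mk.injEq .. ▸ he2).2.symm
    · exfalso; apply h.1; rw [← he1]; exact List.mem_map.mpr ⟨(k, v'), ht2, rfl⟩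
    · exfalso; apply h.1; rw [← he2]; exact List.mem_map.mpr ⟨(k, v), ht1, rfl⟩
    · exact ih h.2 ht1 ht2

-- uniqueness of the returning pair: any hitting table entry is (ofList C, v)
lemma pcap_huniq (l C : List Char) (v : String)
    (hg : pcapFieldNames.get? (String.ofList C) = some v) (hdC : pvDecomp C l) :
    ∀ p ∈ pcapFieldNames.items, pvHit p.1.toList l = true → p = (String.ofList C, v) := by
  intro p hp hph
  have hmem : (String.ofList C, v) ∈ pcapFieldNames.items :=
    PySem.Dict.mem_items_of_get?_eq_some pcapFieldNames hg
  have hokC : pvOkKey C := by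
    have := pcap_keys_ok (String.ofList C, v) (pcap_items_eq ▸ hmem)
    simpa using this
  have hokp : pvOkKey p.1.toList := pcap_keys_ok p (pcap_items_eq ▸ hp)
  have hkey : p.1.toList = C :=
    pvDecomp_unique p.1.toList C l hokp hokC ((pvHit_iff _ _).mp hph) hdC
  have hp1 : p.1 = String.ofList C := by
    rw [← hkey, String.ofList_toList]
  have hval : p.2 = v := by
    apply nodup_val pcapFieldNames.items pcap_keys_nodup (String.ofList C)
    · rw [← hp1]; exact hp
    · exact hmem
  exact Prod.ext hp1 hval

lemma head_dropWhile_false (p : Char → Bool) (xs x : _) (V : List Char)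
    (h : List.dropWhile p xs = x :: V) : p x = false := by
  have hne : List.dropWhile p xs ≠ [] := by rw [h]; simp
  have := List.head_dropWhile_not (p := p) (l := xs) hne
  simp only [h, List.head_cons] at this
  simpa using this

-- pvIdxStart only looks at the first n characters
lemma pvIdxStart_append (l : List Char) (c : Char) :
    ∀ n, n ≤ l.length → pvIdxStart (l ++ [c]) n = pvIdxStart l n := by
  intro n
  induction n with
  | zero => intro _; rfl
  | succ k ih =>
    intro hk
    have hget : (l ++ [c]).getD k ' ' = l.getD k ' ' := by
      have : k < l.length := by omega
      simp [List.getD, List.getElem?_append_left this]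
    simp only [pvIdxStart, hget]
    rw [ih (by omega)]

-- the while-loop computes the length of the string with its trailing digits stripped
lemma pvIdxStart_eq (l : List Char) :
    pvIdxStart l l.length = (l.reverse.dropWhile PySem.Chars.isdigit).length := by
  induction l using List.reverseRecOn with
  | nil => rfl
  | append_singleton l c ih =>
    have hlen : (l ++ [c]).length = l.length + 1 := by simp
    rw [hlen]
    have hget : (l ++ [c]).getD l.length ' ' = c := by simp [List.getD]
    simp only [pvIdxStart, hget]
    by_cases hc : PySem.Chars.isdigit c
    · rw [if_pos hc, pvIdxStart_append l c l.length le_rfl, ih]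
      simp [List.reverse_append, hc]
    · rw [if_neg hc]
      have hc' : PySem.Chars.isdigit c = false := by simpa using hc
      simp [List.reverse_append, hc']

-- the last-'_' split: suffix = reversed takeWhile (≠ '_') of the reversal
lemma rpartition_suffix (k ds : List Char) (h : '_' ∉ ds) :
    ((k ++ '_' :: ds).reverse.takeWhile (fun c => c != '_')).reverse = ds := by
  have hrev : (k ++ '_' :: ds).reverse = ds.reverse ++ '_' :: k.reverse := by
    simp [List.reverse_append]
  have hpos : ∀ a ∈ ds.reverse, (fun c => c != '_') a = true := by
    intro a ha
    have ha' : a ∈ ds := by simpa using ha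
    simp only [bne_iff_ne, ne_eq]
    intro he
    exact h (he ▸ ha')
  rw [hrev, List.takeWhile_append_of_pos hpos]
  simp

-- ===== VERDICT (by name: the statement is the Claim_ definition above) =====
theorem remap_field_name_spec : Claim_equal_remap_field_name := by
  intro fn fm _
  unfold Spec_remap_field_name
  by_cases hm : fm = "pcap"
  case neg =>
    have h1 : (fm != "pcap") = true := by simpa using hm
    rw [remap_field_name, remap_field_name_alt, h1]
    simp
  case pos =>
  subst hm
  rw [remap_field_name, remap_field_name_alt]
  have hmode : (("pcap" : String) != "pcap") = false := by decide
  rw [hmode]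
  simp only [Bool.false_eq_true, if_false]
  rw [pvIdxStart_eq]
  set l := fn.toList with hl
  by_cases hu : '_' ∈ l
  case pos =>
    have hin : PySem.Str.isIn "_" fn = true := by
      rw [PySem.Str.isIn_iff_infix]
      exact (List.singleton_infix_iff _ _).mpr hu
    rw [hin]
    simp only [if_true]
    -- decompose l at the LAST '_': l = C ++ '_' :: T with '_' ∉ T
    set p : Char → Bool := fun c => c != '_' with hp
    have hdne : l.reverse.dropWhile p ≠ [] := by
      intro hnil
      have hall := List.dropWhile_eq_nil_iff.mp hnil
      have := hall '_' (by simpa using hu)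
      simp [hp] at this
    obtain ⟨x, V, hxv⟩ : ∃ x V, l.reverse.dropWhile p = x :: V := by
      cases h : l.reverse.dropWhile p with
      | nil => exact absurd h hdne
      | cons a b => exact ⟨a, b, rfl⟩
    have hx : x = '_' := by
      have := head_dropWhile_false p l.reverse x V hxv
      simpa [hp] using this
    subst hx
    have hrevl : l.reverse = (l.reverse.takeWhile p) ++ '_' :: V := by
      rw [← hxv, List.takeWhile_append_dropWhile]
    set T := (l.reverse.takeWhile p).reverse with hT
    set C := V.reverse with hC
    have hll : l = C ++ '_' :: T := by
      have h2 := congrArg List.reverse hrevl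
      simpa [List.reverse_append] using h2
    have hTnu : '_' ∉ T := by
      intro hmem
      have h3 : ('_' : Char) ∈ l.reverse.takeWhile p := by
        rw [hT] at hmem; simpa using hmem
      have := List.mem_takeWhile_imp h3
      simp [hp] at this
    have hlen : l.length = C.length + T.length + 1 := by rw [hll]; simp; omega
    have hidx : l.length - T.length - 1 = C.length := by omega
    have hbase : l.take (l.length - T.length - 1) = C := by
      rw [hidx, hll]; exact List.take_left' rfl
    rw [hbase]
    by_cases hcond : (PySem.Chars.strIsdigit T && pcapFieldNames.contains (String.ofList C)) = true
    · -- A remaps; B's scan must return the same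
      rw [if_pos hcond]
      obtain ⟨hdig, hcont⟩ := Bool.and_eq_true .. ▸ hcond
      rw [pcap_contains_eq_isSome] at hcont
      obtain ⟨v, hg⟩ := Option.isSome_iff_exists.mp hcont
      have hdC : pvDecomp C l := Or.inr ⟨T, hdig, Or.inr hll⟩
      have hmem : (String.ofList C, v) ∈ pcapFieldNames.items :=
        PySem.Dict.mem_items_of_get?_eq_some pcapFieldNames hg
      have hhit : pvHit (String.ofList C).toList l = true := by
        rw [String.toList_ofList]
        exact (pvHit_iff C l).mpr hdC
      rw [pvScan_eq_some l pcapFieldNames.items (String.ofList C) v hmem hhit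
        (pcap_huniq l C v hg hdC)]
      have hne : l ≠ (String.ofList C).toList := by
        rw [String.toList_ofList]
        intro he
        have := congrArg List.length he
        rw [hlen] at this
        omega
      have hds : pvDs (String.ofList C).toList l = T := by
        rw [String.toList_ofList]
        have hr : l.drop C.length = '_' :: T := by rw [hll]; exact List.drop_left
        have hst : PySem.Chars.startswith ('_' :: T) ['_'] = true :=
          (PySem.Chars.startswith_iff _ _).mpr ⟨T, rfl⟩
        simp [pvDs, hr, hst]
      rw [pvOut, if_neg hne, hds]
      rw [PySem.Dict.getD_eq_get?_getD, hg]
      rfl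
    · -- A returns field_name; B's scan finds nothing
      rw [if_neg hcond]
      rw [pvScan_eq_none l pcapFieldNames.items (by
        intro q hq
        rw [Bool.eq_false_iff]
        intro hqh
        have hokq := pcap_keys_ok q (pcap_items_eq ▸ hq)
        rcases (pvHit_iff _ _).mp hqh with hd | ⟨ds, hdig, hd | hd⟩
        · -- l = key: but '_' ∈ l and keys have no '_'
          have : ('_' : Char) ∈ q.1.toList := hd ▸ hu
          exact (hokq.2 '_' this).2 rfl
        · -- l = key ++ digits: '_' is in neither part
          rcases List.mem_append.mp (hd ▸ hu) with h1 | h1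
          · exact (hokq.2 '_' h1).2 rfl
          · have := (strIsdigit_spec ds hdig).2 '_' h1
            exact absurd this (by decide)
        · -- l = key ++ '_' :: digits: forces key = C, digits = T, contradicting hcond
          have hdsnu : '_' ∉ ds := by
            intro h1
            have := (strIsdigit_spec ds hdig).2 '_' h1
            exact absurd this (by decide)
          have hTds : T = ds := by
            rw [hT, hl] at *
            rw [hd] at hT ⊢
            rw [hT]
            exact rpartition_suffix q.1.toList ds hdsnu
          have hCk : C = q.1.toList := by
            have h2 : C ++ '_' :: T = q.1.toList ++ '_' :: ds := by rw [← hll, hd]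
            have hlen2 : C.length = q.1.toList.length := by
              have := congrArg List.length h2
              simp only [List.length_append, List.length_cons, hTds] at this ⊢
              omega
            exact (List.append_inj h2 hlen2).1
          -- key is in the table, so contains C and strIsdigit T both hold
          obtain ⟨k', v'⟩ := q
          have hg' : pcapFieldNames.get? k' = some v' :=
            PySem.Dict.get?_of_mem_items pcapFieldNames hq pcap_keys_nodup
          apply hcond
          rw [Bool.and_eq_true]
          constructor
          · rw [hTds]; exact hdig
          · rw [pcap_contains_eq_isSome]
            have : String.ofList C = k' := by rw [hCk, String.ofList_toList]
            rw [this, hg']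
            rfl)]
  case neg =>
    -- no '_' in the name: A takes the trailing-digit while-loop path
    have hin : PySem.Str.isIn "_" fn = false := by
      rw [Bool.eq_false_iff]
      intro h
      have h1 := (PySem.Str.isIn_iff_infix _ _).mp h
      have h2 : ("_" : String).toList = ['_'] := by decide
      rw [h2] at h1
      exact hu ((List.singleton_infix_iff _ _).mp h1)
    rw [hin]
    simp only [Bool.false_eq_true, if_false]
    have hsplit : l = (l.reverse.dropWhile PySem.Chars.isdigit).reverse ++
        (l.reverse.takeWhile PySem.Chars.isdigit).reverse := by
      rw [← List.reverse_append, List.takeWhile_append_dropWhile, List.reverse_reverse]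
    by_cases hS : l.reverse.takeWhile PySem.Chars.isdigit = []
    · -- no trailing digits: A is a plain dict lookup
      have hdw : l.reverse.dropWhile PySem.Chars.isdigit = l.reverse := by
        have := List.takeWhile_append_dropWhile (p := PySem.Chars.isdigit) (l := l.reverse)
        rw [hS] at this; simpa using this
      rw [hdw]
      simp only [List.length_reverse, if_pos]
      cases hg : pcapFieldNames.get? fn with
      | some v =>
        -- fn itself is a key
        have hmem : (fn, v) ∈ pcapFieldNames.items :=
          PySem.Dict.mem_items_of_get?_eq_some pcapFieldNames hg
        have hg' : pcapFieldNames.get? (String.ofList l) = some v := by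
          rw [hl, String.ofList_toList]; exact hg
        have hdC : pvDecomp l l := Or.inl rfl
        have hmem' : (String.ofList l, v) ∈ pcapFieldNames.items := by
          rw [hl, String.ofList_toList]; exact hmem
        rw [pvScan_eq_some l pcapFieldNames.items (String.ofList l) v hmem'
          (by rw [String.toList_ofList]; exact (pvHit_iff l l).mpr hdC)
          (pcap_huniq l l v hg' hdC)]
        rw [pvOut, if_pos (String.toList_ofList).symm]
        rw [PySem.Dict.getD_eq_get?_getD, hg]
        rfl
      | none =>
        -- fn is no key and has no trailing digits: nothing hits
        rw [pvScan_eq_none l pcapFieldNames.items (by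
          intro q hq
          rw [Bool.eq_false_iff]
          intro hqh
          rcases (pvHit_iff _ _).mp hqh with hd | ⟨ds, hdig, hd | hd⟩
          · -- l = key: get? fn would be some
            have hg' : pcapFieldNames.get? q.1 = some q.2 :=
              PySem.Dict.get?_of_mem_items pcapFieldNames (by simpa using hq) pcap_keys_nodup
            have : q.1 = fn := by
              rw [← String.ofList_toList (s := q.1), ← hd]
              exact String.ofList_toList
            rw [this, hg] at hg'
            simp at hg'
          · -- l ends in a digit, contradicting hS
            obtain ⟨hne, hall⟩ := strIsdigit_spec ds hdig
            obtain ⟨c, u, hcu⟩ : ∃ c u, ds.reverse = c :: u := by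
              cases h : ds.reverse with
              | nil => exact absurd (by simpa using h) hne
              | cons a b => exact ⟨a, b, rfl⟩
            have hrev : l.reverse = c :: (u ++ q.1.toList.reverse) := by
              rw [hd]; simp [List.reverse_append, hcu]
            have hcd : PySem.Chars.isdigit c = true :=
              hall c (by
                have : c ∈ ds.reverse := by rw [hcu]; simp
                simpa using this)
            rw [hrev, List.takeWhile_cons_of_pos hcd] at hS
            simp at hS
          · -- '_' ∈ l, contradiction
            exact hu (by rw [hd]; simp))]
        rw [PySem.Dict.getD_eq_get?_getD, hg]
        rfl
    · -- a nonempty trailing digit run S; base Bb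
      have hSne : (l.reverse.takeWhile PySem.Chars.isdigit).reverse ≠ [] := by simpa using hS
      have hlen2 : (l.reverse.dropWhile PySem.Chars.isdigit).length +
          (l.reverse.takeWhile PySem.Chars.isdigit).length = l.length := by
        have := congrArg List.length hsplit
        simp at this; omega
      have hSpos : 0 < (l.reverse.takeWhile PySem.Chars.isdigit).length :=
        List.length_pos_iff.mpr hS
      have hine : (l.reverse.dropWhile PySem.Chars.isdigit).length ≠ l.length := by omega
      rw [if_neg hine]
      have hlr : (l.reverse.dropWhile PySem.Chars.isdigit).length =
          (l.reverse.dropWhile PySem.Chars.isdigit).reverse.length := by simp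
      rw [hlr]
      set Bb := (l.reverse.dropWhile PySem.Chars.isdigit).reverse with hBbdef
      set S := (l.reverse.takeWhile PySem.Chars.isdigit).reverse with hSdef
      have htake : l.take Bb.length = Bb := by
        conv_lhs => rw [hsplit]
        exact List.take_left' rfl
      have hdrop2 : l.drop Bb.length = S := by
        conv_lhs => rw [hsplit]
        exact List.drop_left' rfl
      rw [htake, hdrop2]
      have hdigS : PySem.Chars.strIsdigit S = true := by
        rw [PySem.Chars.strIsdigit]
        simp only [Bool.and_eq_true, List.all_eq_true]
        constructor
        · simpa [List.isEmpty_iff] using hSne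
        · intro c hc
          exact List.mem_takeWhile_imp (by rw [hSdef] at hc; simpa using hc)
      rw [hdigS]
      simp only [Bool.not_true, Bool.or_false]
      cases hg : pcapFieldNames.get? (String.ofList Bb) with
      | some v =>
        -- A remaps with base Bb, suffix S
        have hcont : pcapFieldNames.contains (String.ofList Bb) = true := by
          rw [pcap_contains_eq_isSome, hg]; rfl
        rw [hcont]
        simp only [Bool.not_true, Bool.false_eq_true, if_false]
        have hdC : pvDecomp Bb l := Or.inr ⟨S, hdigS, Or.inl hsplit⟩
        have hmem : (String.ofList Bb, v) ∈ pcapFieldNames.items :=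
          PySem.Dict.mem_items_of_get?_eq_some pcapFieldNames hg
        rw [pvScan_eq_some l pcapFieldNames.items (String.ofList Bb) v hmem
          (by rw [String.toList_ofList]; exact (pvHit_iff Bb l).mpr hdC)
          (pcap_huniq l Bb v hg hdC)]
        have hne : l ≠ (String.ofList Bb).toList := by
          rw [String.toList_ofList]
          intro he
          have := congrArg List.length he
          rw [hsplit] at this
          simp only [List.length_append] at this
          simp only [hSdef, List.length_reverse] at this
          omega
        have hds : pvDs (String.ofList Bb).toList l = S := by
          rw [String.toList_ofList]
          have hr : l.drop Bb.length = S := by rw [hsplit]; exact List.drop_left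
          simp only [pvDs, hr]
          rw [if_neg (by simp [startswith_underscore_false S hdigS])]
        rw [pvOut, if_neg hne, hds]
        rw [PySem.Dict.getD_eq_get?_getD, hg]
        rfl
      | none =>
        -- base not in the table: A returns field_name, B's scan finds nothing
        have hcont : pcapFieldNames.contains (String.ofList Bb) = false := by
          rw [pcap_contains_eq_isSome, hg]; rfl
        simp only [hcont, Bool.not_false, if_true]
        rw [pvScan_eq_none l pcapFieldNames.items (by
          intro q hq
          rw [Bool.eq_false_iff]
          intro hqh
          have hokq := pcap_keys_ok q (pcap_items_eq ▸ hq)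
          rcases (pvHit_iff _ _).mp hqh with hd | ⟨ds, hdig, hd | hd⟩
          · -- l = key: but l ends with a digit and keys have none
            obtain ⟨c, hcS⟩ : ∃ c, c ∈ S := List.exists_mem_of_ne_nil S hSne
            have hcd : PySem.Chars.isdigit c = true :=
              List.mem_takeWhile_imp (by rw [hSdef] at hcS; simpa using hcS)
            have hcl : c ∈ l := by rw [hsplit]; exact List.mem_append_right _ hcS
            have := (hokq.2 c (hd ▸ hcl)).1
            rw [this] at hcd
            simp at hcd
          · -- l = key ++ digits: maximality forces key = Bb, but Bb is no key
            have hkne : q.1.toList ≠ [] := hokq.1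
            obtain ⟨c, u, hcu⟩ : ∃ c u, q.1.toList.reverse = c :: u := by
              cases h : q.1.toList.reverse with
              | nil => exact absurd (by simpa using h) hkne
              | cons a b => exact ⟨a, b, rfl⟩
            have hcnd : PySem.Chars.isdigit c = false :=
              (hokq.2 c (by
                have : c ∈ q.1.toList.reverse := by rw [hcu]; simp
                simpa using this)).1
            have hdw2 : l.reverse.dropWhile PySem.Chars.isdigit = q.1.toList.reverse := by
              rw [hd, List.reverse_append]
              rw [List.dropWhile_append_of_pos (by
                intro a ha
                exact (strIsdigit_spec ds hdig).2 a (by simpa using ha))]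
              rw [hcu, List.dropWhile_cons_of_neg (by simp [hcnd])]
            have hBk : Bb = q.1.toList := by
              rw [hBbdef, hdw2, List.reverse_reverse]
            have hg' : pcapFieldNames.get? q.1 = some q.2 :=
              PySem.Dict.get?_of_mem_items pcapFieldNames (by simpa using hq) pcap_keys_nodup
            have : String.ofList Bb = q.1 := by rw [hBk, String.ofList_toList]
            rw [this, hg'] at hg
            simp at hg
          · -- '_' ∈ l, contradiction
            exact hu (by rw [hd]; simp))]
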